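-- pv_equiv track=rewrite | github.com/KIT-IAI/PIDE | helper/notebook_utils.py | utils_sort_folders_by_desired_order
-- ===== SOURCE A (Python) =====
-- def utils_sort_folders_by_desired_order(desired_order, scanned_folders):
--     """ Sorts folders based on a desired order, ensuring unique entries.
--     Args:
--         desired_order (list of str): The desired order for the folder names.
--         scanned_folders (list of str): The folders that were scanned.
--     Returns:
--         list of str: The folders sorted based on the desired order.
--     """
--     sorted_folders = []
--     seen = set()
--     for criteria in desired_order:
--         for folder in scanned_folders:
--             if criteria in folder and folder not in seen:
--                 sorted_folders.append(folder)
--                 seen.add(folder)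
--     return sorted_folders
-- ===== SOURCE B (Python) =====
-- def utils_sort_folders_by_desired_order(desired_order, scanned_folders):
--     """Bucket-by-first-matching-criterion re-implementation (single pass over folders)."""
--     buckets = [[] for _ in desired_order]
--     seen = set()
--     for folder in scanned_folders:
--         if folder in seen:
--             continue
--         seen.add(folder)
--         for i, criteria in enumerate(desired_order):
--             if criteria in folder:
--                 buckets[i].append(folder)
--                 break
--     return [folder for bucket in buckets for folder in bucket]
-- ===== Notes on version B (the rewrite author's own statement) =====
-- stated objective: faster
-- what changed: Replaces the criteria-outer nested scan (for each criterion, rescan all folders) with a single folder-outer pass that dedupes folders up front, assigns each new folder to the bucket of its first matching criterion (breaking at the first match), and flattens the buckets.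
import Mathlib
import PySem

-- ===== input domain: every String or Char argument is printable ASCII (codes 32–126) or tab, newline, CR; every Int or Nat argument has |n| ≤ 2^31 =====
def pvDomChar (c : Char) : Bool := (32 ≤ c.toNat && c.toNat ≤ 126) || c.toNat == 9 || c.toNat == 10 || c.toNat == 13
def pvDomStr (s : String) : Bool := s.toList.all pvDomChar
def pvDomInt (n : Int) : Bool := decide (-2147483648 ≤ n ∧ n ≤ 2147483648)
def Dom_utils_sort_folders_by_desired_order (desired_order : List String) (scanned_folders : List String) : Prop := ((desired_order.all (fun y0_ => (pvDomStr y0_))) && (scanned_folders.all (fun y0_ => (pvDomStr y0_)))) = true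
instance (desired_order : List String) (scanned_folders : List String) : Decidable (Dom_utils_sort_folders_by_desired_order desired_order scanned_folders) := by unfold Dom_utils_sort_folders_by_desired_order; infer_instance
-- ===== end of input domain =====

-- B replaces A's criteria-outer nested rescan by a single dedup-first pass over the folders that
-- buckets each folder under its first matching criterion and flattens the buckets (objective: alternative).

-- ===== PORT A =====
def utils_sort_folders_by_desired_order (desired_order : List String) (scanned_folders : List String) : List String :=
  (desired_order.foldl
    (fun (st : List String × PySem.Set String) criteria =>
      scanned_folders.foldl
        (fun (st : List String × PySem.Set String) folder =>
          if PySem.Str.isIn criteria folder && !(PySem.Set.contains st.2 folder)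
          then (st.1 ++ [folder], PySem.Set.add st.2 folder)
          else st)
        st)
    ([], PySem.Set.empty)).1

-- ===== PORT B =====
-- the inner 'for i, criteria in enumerate(desired_order): if criteria in folder: …; break' loop
def pvFirstMatch (pairs : List (Int × String)) (folder : String) : Option Int :=
  match pairs with
  | [] => none
  | (i, criteria) :: rest =>
    if PySem.Str.isIn criteria folder then some i else pvFirstMatch rest folder

-- buckets[i].append(folder) is ported value-wise as buckets[i] = buckets[i] + [folder]; the index i
-- comes from enumerate(desired_order) so it is always in range and the total pyGetD/pySetD are exact.
def utils_sort_folders_by_desired_order_alt (desired_order : List String) (scanned_folders : List String) : List String :=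
  (scanned_folders.foldl
    (fun (st : List (List String) × PySem.Set String) folder =>
      if PySem.Set.contains st.2 folder then st
      else
        let seen := PySem.Set.add st.2 folder
        match pvFirstMatch (PySem.List.enumerate desired_order 0) folder with
        | some i => (PySem.List.pySetD st.1 i (PySem.List.pyGetD st.1 i [] ++ [folder]), seen)
        | none => (st.1, seen))
    (desired_order.map (fun _ => ([] : List String)), PySem.Set.empty)).1.flatten

-- ===== PRECONDITION & SPEC =====
def Spec_utils_sort_folders_by_desired_order (desired_order : List String) (scanned_folders : List String) (out : List String) : Prop := out = utils_sort_folders_by_desired_order_alt desired_order scanned_folders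
instance (desired_order : List String) (scanned_folders : List String) (out : List String) : Decidable (Spec_utils_sort_folders_by_desired_order desired_order scanned_folders out) := by unfold Spec_utils_sort_folders_by_desired_order; infer_instance

-- ===== CLAIM (what is proved, stated in full; the proofs are below) =====
def Claim_equal_utils_sort_folders_by_desired_order : Prop := ∀ (desired_order : List String) (scanned_folders : List String), Dom_utils_sort_folders_by_desired_order desired_order scanned_folders → Spec_utils_sort_folders_by_desired_order desired_order scanned_folders (utils_sort_folders_by_desired_order desired_order scanned_folders)

-- ===== LEMMAS AND PROOFS =====
def pvDed : List String → List String
  | [] => []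
  | x :: t => x :: (pvDed t).filter (fun y => !(y == x))

theorem mem_pvDed (l : List String) (y : String) : y ∈ pvDed l ↔ y ∈ l := by
  induction l with
  | nil => simp [pvDed]
  | cons x t ih =>
    simp [pvDed, List.mem_filter, ih]
    tauto

theorem foldl_add_eq (l : List String) : ∀ s : List String,
    l.foldl PySem.Set.add s = s ++ (pvDed l).filter (fun x => !(s.contains x)) := by
  induction l with
  | nil => intro s; simp [pvDed]
  | cons x t ih =>
    intro s
    show t.foldl PySem.Set.add (PySem.Set.add s x) = _
    by_cases hx : x ∈ s
    · have hc : PySem.Set.add s x = s := by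
        simp [PySem.Set.add, List.contains_iff_mem.mpr hx]; exact hx
      rw [hc, ih s]
      congr 1
      simp only [pvDed, List.filter_cons, List.filter_filter]
      rw [if_neg (by simp [hx])]
      apply List.filter_congr
      intro y _
      by_cases hyx : y = x
      · subst hyx; simp [hx]
      · simp [hyx]
    · have hc : PySem.Set.add s x = s ++ [x] := by
        simp [PySem.Set.add, hx]
      rw [hc, ih (s ++ [x])]
      simp only [pvDed, List.filter_cons, List.filter_filter, List.append_assoc]
      rw [if_pos (by simp [hx])]
      simp only [List.singleton_append, List.cons.injEq, true_and]
      congr 1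
      congr 1
      apply List.filter_congr
      intro y _
      by_cases hyx : y = x
      · subst hyx; simp
      · simp [hyx]

theorem ofList_eq_pvDed (l : List String) : PySem.Set.ofList l = pvDed l := by
  rw [PySem.Set.ofList_eq_foldl, foldl_add_eq]
  simp

theorem innerA (c : String) (fs : List String) : ∀ acc : List String,
    fs.foldl (fun a f => if PySem.Str.isIn c f && !(a.contains f) then a ++ [f] else a) acc
      = acc ++ (pvDed fs).filter (fun f => PySem.Str.isIn c f && !(acc.contains f)) := by
  induction fs with
  | nil => intro acc; simp [pvDed]
  | cons f rest ih =>
    intro acc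
    simp only [List.foldl_cons]
    by_cases hin : PySem.Chars.isIn c.toList f.toList = true
    · by_cases hmem : f ∈ acc
      · rw [if_neg (by simp [hin, hmem]), ih acc]
        congr 1
        simp only [pvDed, List.filter_cons, List.filter_filter]
        rw [if_neg (by simp [hin, hmem])]
        apply List.filter_congr
        intro y _
        by_cases hyx : y = f
        · subst hyx; simp [hmem]
        · simp [hyx]
      · rw [if_pos (by simp [hin, hmem]), ih (acc ++ [f])]
        simp only [pvDed, List.filter_cons, List.filter_filter, List.append_assoc]
        rw [if_pos (by simp [hin, hmem])]
        simp only [List.singleton_append, List.cons.injEq, true_and]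
        congr 1
        congr 1
        apply List.filter_congr
        intro y _
        by_cases hyx : y = f
        · subst hyx; simp
        · simp [hyx]
    · rw [if_neg (by simp [hin]), ih acc]
      congr 1
      simp only [pvDed, List.filter_cons, List.filter_filter]
      rw [if_neg (by simp [hin])]
      apply List.filter_congr
      intro y _
      by_cases hyx : y = f
      · subst hyx; simp [hin]
      · simp [hyx]

theorem pairA (c : String) (fs : List String) : ∀ acc : List String,
    fs.foldl
      (fun (st : List String × PySem.Set String) f =>
        if PySem.Str.isIn c f && !(PySem.Set.contains st.2 f)
        then (st.1 ++ [f], PySem.Set.add st.2 f) else st) (acc, acc)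
      = (fs.foldl (fun a f => if PySem.Str.isIn c f && !(a.contains f) then a ++ [f] else a) acc,
         fs.foldl (fun a f => if PySem.Str.isIn c f && !(a.contains f) then a ++ [f] else a) acc) := by
  induction fs with
  | nil => intro acc; rfl
  | cons f rest ih =>
    intro acc
    simp only [List.foldl_cons]
    dsimp only [PySem.Set.contains]
    by_cases h : (PySem.Str.isIn c f && !(acc.contains f)) = true
    · rw [if_pos h, if_pos h]
      have hcf : acc.contains f = false := by
        have h2 := (Bool.and_eq_true _ _).mp h |>.2
        simpa using h2
      have hcf' : PySem.Set.contains acc f = false := hcf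
      have hadd : PySem.Set.add acc f = acc ++ [f] := by
        simp only [PySem.Set.add, hcf', Bool.false_eq_true, if_false]
      rw [hadd]
      exact ih (acc ++ [f])
    · rw [if_neg h, if_neg h]
      exact ih acc

def pvFidx (ds : List String) (f : String) : Option Nat :=
  ds.findIdx? (fun c => PySem.Str.isIn c f)

def pvGrp (ds fs : List String) (i : Nat) : List String :=
  (pvDed fs).filter (fun f => pvFidx ds f == some i)

def pvGAll (ds fs : List String) (k : Nat) : List String :=
  (List.range k).flatMap (pvGrp ds fs)

theorem pv_findIdx?_append_cons_eq_len {α : Type} (p : α → Bool) (l1 : List α) (c : α) (t : List α) :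
    List.findIdx? p (l1 ++ c :: t) = some l1.length ↔ ((∀ x ∈ l1, ¬ p x = true) ∧ p c = true) := by
  rw [List.findIdx?_eq_some_iff_getElem]
  constructor
  · rintro ⟨h, hp, hmin⟩
    constructor
    · intro x hx
      rcases List.mem_iff_getElem.mp hx with ⟨j, hj, rfl⟩
      have hm := hmin j (by omega)
      rwa [List.getElem_append_left hj] at hm
    · have : (l1 ++ c :: t)[l1.length] = c := by
        rw [List.getElem_append_right (by omega)]
        simp
      rwa [this] at hp
  · rintro ⟨hall, hc⟩
    have hlen : l1.length < (l1 ++ c :: t).length := by simp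
    refine ⟨hlen, ?_, ?_⟩
    · have : (l1 ++ c :: t)[l1.length] = c := by
        rw [List.getElem_append_right (by omega)]
        simp
      rw [this]; exact hc
    · intro j hj
      have hjl : j < l1.length := hj
      rw [List.getElem_append_left hjl]
      exact hall _ (List.getElem_mem hjl)

theorem pv_findIdx?_append_cons_lt {α : Type} (p : α → Bool) (l1 : List α) (c : α) (t : List α) :
    (∃ i, List.findIdx? p (l1 ++ c :: t) = some i ∧ i < l1.length) ↔ ∃ x ∈ l1, p x = true := by
  constructor
  · rintro ⟨i, hi, hlt⟩
    rcases List.findIdx?_eq_some_iff_getElem.mp hi with ⟨h, hp, _⟩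
    refine ⟨(l1 ++ c :: t)[i], ?_, hp⟩
    rw [List.getElem_append_left hlt]
    exact List.getElem_mem hlt
  · rintro ⟨x, hx, hpx⟩
    cases hfi : List.findIdx? p (l1 ++ c :: t) with
    | none =>
      rw [List.findIdx?_eq_none_iff] at hfi
      have := hfi x (by simp [hx])
      rw [hpx] at this; cases this
    | some i =>
      refine ⟨i, rfl, ?_⟩
      rcases List.findIdx?_eq_some_iff_getElem.mp hfi with ⟨h, _, hmin⟩
      by_contra hge
      push Not at hge
      rcases List.mem_iff_getElem.mp hx with ⟨j, hj, rfl⟩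
      exact hmin j (by omega) (by rw [List.getElem_append_left hj]; exact hpx)

theorem mem_pvGAll (ds fs : List String) (k : Nat) (f : String) :
    f ∈ pvGAll ds fs k ↔ ∃ i < k, f ∈ pvDed fs ∧ pvFidx ds f = some i := by
  simp [pvGAll, pvGrp, List.mem_flatMap, List.mem_filter, List.mem_range]

theorem pvFirstMatch_enumerate (f : String) : ∀ (ds : List String) (s : Int),
    pvFirstMatch (PySem.List.enumerate ds s) f = (pvFidx ds f).map (fun i => s + (i : Int)) := by
  intro ds
  induction ds with
  | nil => intro s; simp [PySem.List.enumerate_nil, pvFirstMatch, pvFidx]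
  | cons c t ih =>
    intro s
    rw [PySem.List.enumerate_cons]
    simp only [pvFirstMatch, pvFidx, List.findIdx?_cons]
    by_cases h : PySem.Str.isIn c f = true
    · rw [if_pos h, if_pos h]
      simp
    · rw [if_neg h, if_neg h, ih (s + 1)]
      simp only [pvFidx]
      cases List.findIdx? (fun c => PySem.Str.isIn c f) t <;> simp
      · omega

theorem pvFidx_lt (ds : List String) (f : String) (i : Nat) (h : pvFidx ds f = some i) :
    i < ds.length :=
  (List.findIdx?_eq_some_iff_findIdx_eq.mp h).1

theorem pvDed_append_mem (p : List String) (f : String) (hf : f ∈ p) :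
    pvDed (p ++ [f]) = pvDed p := by
  rw [← ofList_eq_pvDed, ← ofList_eq_pvDed, PySem.Set.ofList_eq_foldl, List.foldl_append]
  rw [← PySem.Set.ofList_eq_foldl]
  show PySem.Set.add _ _ = _
  simp [PySem.Set.add, ofList_eq_pvDed, mem_pvDed, hf]

theorem pvDed_append_not_mem (p : List String) (f : String) (hf : f ∉ p) :
    pvDed (p ++ [f]) = pvDed p ++ [f] := by
  rw [← ofList_eq_pvDed, ← ofList_eq_pvDed, PySem.Set.ofList_eq_foldl, List.foldl_append]
  rw [← PySem.Set.ofList_eq_foldl]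
  show PySem.Set.add _ _ = _
  simp [PySem.Set.add, ofList_eq_pvDed, mem_pvDed, hf]

theorem pvGAll_succ (ds fs : List String) (k : Nat) :
    pvGAll ds fs (k + 1) = pvGAll ds fs k ++ pvGrp ds fs k := by
  simp [pvGAll, List.range_succ]

theorem outerA (fs : List String) : ∀ (ds₂ ds₁ : List String),
    ds₂.foldl
      (fun acc c => fs.foldl (fun a f => if PySem.Str.isIn c f && !(a.contains f) then a ++ [f] else a) acc)
      (pvGAll (ds₁ ++ ds₂) fs ds₁.length)
      = pvGAll (ds₁ ++ ds₂) fs (ds₁ ++ ds₂).length := by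
  intro ds₂
  induction ds₂ with
  | nil => intro ds₁; simp
  | cons c t ih =>
    intro ds₁
    simp only [List.foldl_cons]
    rw [innerA]
    have hfilter : (pvDed fs).filter
        (fun f => PySem.Str.isIn c f && !((pvGAll (ds₁ ++ c :: t) fs ds₁.length).contains f))
        = pvGrp (ds₁ ++ c :: t) fs ds₁.length := by
      apply List.filter_congr
      intro f hf
      have hmem : (pvGAll (ds₁ ++ c :: t) fs ds₁.length).contains f = true ↔
          ∃ c' ∈ ds₁, PySem.Str.isIn c' f = true := by
        rw [List.contains_iff_mem, mem_pvGAll]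
        constructor
        · rintro ⟨i, hik, _, hfi⟩
          exact (pv_findIdx?_append_cons_lt _ ds₁ c t).mp ⟨i, hfi, hik⟩
        · intro hex
          rcases (pv_findIdx?_append_cons_lt (fun c' => PySem.Str.isIn c' f) ds₁ c t).mpr hex
            with ⟨i, hfi, hik⟩
          exact ⟨i, hik, hf, hfi⟩
      have heq : (pvFidx (ds₁ ++ c :: t) f == some ds₁.length) = true ↔
          ((∀ c' ∈ ds₁, ¬ (PySem.Str.isIn c' f = true)) ∧ PySem.Str.isIn c f = true) := by
        rw [beq_iff_eq]
        exact pv_findIdx?_append_cons_eq_len _ ds₁ c t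
      show (PySem.Str.isIn c f && !((pvGAll (ds₁ ++ c :: t) fs ds₁.length).contains f))
          = (pvFidx (ds₁ ++ c :: t) f == some ds₁.length)
      by_cases hres : (pvFidx (ds₁ ++ c :: t) f == some ds₁.length) = true
      · rw [hres]
        rcases heq.mp hres with ⟨hall, hc⟩
        have : (pvGAll (ds₁ ++ c :: t) fs ds₁.length).contains f = false := by
          rw [← Bool.not_eq_true]
          intro hcon
          rcases hmem.mp hcon with ⟨c', hc', hin⟩
          exact hall c' hc' hin
        rw [hc, this]
        rfl
      · rw [Bool.not_eq_true] at hres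
        rw [hres]
        rw [← Bool.not_eq_true] at hres
        by_cases hc : PySem.Str.isIn c f = true
        · have : ∃ c' ∈ ds₁, PySem.Str.isIn c' f = true := by
            by_contra hno
            push Not at hno
            exact hres (heq.mpr ⟨fun c' h1 h2 => hno c' h1 h2, hc⟩)
          rw [hc, hmem.mpr this]
          rfl
        · simp only [Bool.not_eq_true] at hc
          rw [hc]
          rfl
    rw [hfilter, ← pvGAll_succ]
    have hre : ds₁ ++ c :: t = (ds₁ ++ [c]) ++ t := by simp
    have hlen : ds₁.length + 1 = (ds₁ ++ [c]).length := by simp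
    rw [hre, hlen, ih (ds₁ ++ [c])]

theorem foldB (ds : List String) : ∀ (fs₂ p : List String),
    fs₂.foldl
      (fun (st : List (List String) × PySem.Set String) folder =>
        if PySem.Set.contains st.2 folder then st
        else
          let seen := PySem.Set.add st.2 folder
          match pvFirstMatch (PySem.List.enumerate ds 0) folder with
          | some i => (PySem.List.pySetD st.1 i (PySem.List.pyGetD st.1 i [] ++ [folder]), seen)
          | none => (st.1, seen))
      ((List.range ds.length).map (fun i => (pvDed p).filter (fun f => pvFidx ds f == some i)),
        PySem.Set.ofList p)
      = ((List.range ds.length).map (fun i => (pvDed (p ++ fs₂)).filter (fun f => pvFidx ds f == some i)),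
          PySem.Set.ofList (p ++ fs₂)) := by
  intro fs₂
  induction fs₂ with
  | nil => intro p; simp
  | cons folder rest ih =>
    intro p
    simp only [List.foldl_cons]
    have hofl : PySem.Set.ofList (p ++ [folder]) = PySem.Set.add (PySem.Set.ofList p) folder := by
      rw [PySem.Set.ofList_eq_foldl, List.foldl_append, ← PySem.Set.ofList_eq_foldl]
      rfl
    by_cases hmem : folder ∈ p
    · have hcont : PySem.Set.contains (PySem.Set.ofList p) folder = true := by
        show List.contains (PySem.Set.ofList p) folder = true
        rw [ofList_eq_pvDed, List.contains_iff_mem, mem_pvDed]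
        exact hmem
      rw [if_pos hcont]
      have h1 : pvDed (p ++ [folder]) = pvDed p := pvDed_append_mem p folder hmem
      have h2 : PySem.Set.ofList (p ++ [folder]) = PySem.Set.ofList p := by
        rw [hofl]
        simp [PySem.Set.add, ofList_eq_pvDed, mem_pvDed, hmem]
      have := ih (p ++ [folder])
      rw [h1, h2] at this
      rw [this]
      simp only [List.append_assoc, List.singleton_append]
    · have hcont : PySem.Set.contains (PySem.Set.ofList p) folder = false := by
        show List.contains (PySem.Set.ofList p) folder = false
        rw [ofList_eq_pvDed]
        simp [mem_pvDed, hmem]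
      rw [if_neg (by simp [ofList_eq_pvDed, mem_pvDed, hmem])]
      have hadd : PySem.Set.add (PySem.Set.ofList p) folder = PySem.Set.ofList (p ++ [folder]) := by
        rw [hofl]
      have hded : pvDed (p ++ [folder]) = pvDed p ++ [folder] := pvDed_append_not_mem p folder hmem
      cases hfi : pvFidx ds folder with
      | none =>
        have hpm : pvFirstMatch (PySem.List.enumerate ds 0) folder = none := by
          rw [pvFirstMatch_enumerate, hfi]; rfl
        simp only [hpm]
        have hb : ((List.range ds.length).map (fun i => (pvDed p).filter (fun f => pvFidx ds f == some i)))
            = ((List.range ds.length).map (fun i => (pvDed (p ++ [folder])).filter (fun f => pvFidx ds f == some i))) := by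
          apply List.map_congr_left
          intro i _
          rw [hded, List.filter_append]
          simp [hfi]
        rw [show (PySem.Set.add (PySem.Set.ofList p) folder) = PySem.Set.ofList (p ++ [folder]) from hadd]
        rw [hb]
        have := ih (p ++ [folder])
        rw [this]
        simp only [List.append_assoc, List.singleton_append]
      | some i =>
        have hpm : pvFirstMatch (PySem.List.enumerate ds 0) folder = some ((i : Nat) : Int) := by
          rw [pvFirstMatch_enumerate, hfi]; simp
        simp only [hpm]
        have hilt : i < ds.length := pvFidx_lt ds folder i hfi
        rw [PySem.List.pySetD_natCast, PySem.List.pyGetD_natCast]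
        have hget : ((List.range ds.length).map (fun j => (pvDed p).filter (fun f => pvFidx ds f == some j))).getD i []
            = (pvDed p).filter (fun f => pvFidx ds f == some i) := by
          rw [List.getD_eq_getElem _ _ (by simp [hilt])]
          simp
        rw [hget]
        have hset : ((List.range ds.length).map (fun j => (pvDed p).filter (fun f => pvFidx ds f == some j))).set i
              ((pvDed p).filter (fun f => pvFidx ds f == some i) ++ [folder])
            = (List.range ds.length).map (fun j => (pvDed (p ++ [folder])).filter (fun f => pvFidx ds f == some j)) := by
          apply List.ext_getElem
          · simp
          · intro j hj1 hj2
            simp only [List.length_set, List.length_map, List.length_range] at hj1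
            rw [List.getElem_set]
            simp only [List.getElem_map, List.getElem_range]
            rw [hded, List.filter_append]
            by_cases hji : i = j
            · subst hji
              rw [if_pos rfl]
              simp [hfi]
            · rw [if_neg hji]
              have : (pvFidx ds folder == some j) = false := by
                simp [hfi, hji]
              simp [this]
        rw [hset, hadd]
        have := ih (p ++ [folder])
        rw [this]
        simp only [List.append_assoc, List.singleton_append]

theorem pairOuter (fs : List String) : ∀ (ds : List String) (acc : List String),
    ds.foldl
      (fun (st : List String × PySem.Set String) c =>
        fs.foldl
          (fun (st : List String × PySem.Set String) f =>
            if PySem.Str.isIn c f && !(PySem.Set.contains st.2 f)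
            then (st.1 ++ [f], PySem.Set.add st.2 f) else st)
          st)
      (acc, acc)
      = (ds.foldl
           (fun a c => fs.foldl (fun a f => if PySem.Str.isIn c f && !(a.contains f) then a ++ [f] else a) a)
           acc,
         (ds.foldl
           (fun a c => fs.foldl (fun a f => if PySem.Str.isIn c f && !(a.contains f) then a ++ [f] else a) a)
           acc : PySem.Set String)) := by
  intro ds
  induction ds with
  | nil => intro acc; rfl
  | cons c t ih =>
    intro acc
    simp only [List.foldl_cons]
    rw [pairA]
    exact ih _

theorem portA_eq_canon (ds fs : List String) :
    utils_sort_folders_by_desired_order ds fs = pvGAll ds fs ds.length := by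
  unfold utils_sort_folders_by_desired_order
  have h0 : (([] : List String), (PySem.Set.empty : PySem.Set String))
      = ((([] : List String)), (([] : List String) : PySem.Set String)) := rfl
  rw [h0, pairOuter]
  have := outerA fs ds []
  simp only [List.nil_append, List.length_nil] at this
  rw [show pvGAll ds fs 0 = [] from rfl] at this
  exact this

theorem portB_eq_canon (ds fs : List String) :
    utils_sort_folders_by_desired_order_alt ds fs = pvGAll ds fs ds.length := by
  unfold utils_sort_folders_by_desired_order_alt
  have hinit : (ds.map (fun _ => ([] : List String)))
      = (List.range ds.length).map (fun i => (pvDed []).filter (fun f => pvFidx ds f == some i)) := by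
    simp [pvDed, List.map_const']
  have hempty : (PySem.Set.empty : PySem.Set String) = PySem.Set.ofList [] := rfl
  rw [hinit, hempty, foldB ds fs []]
  simp only [List.nil_append]
  rw [← List.flatMap_def]
  rfl

-- ===== VERDICT (by name: the statement is the Claim_ definition above) =====
theorem utils_sort_folders_by_desired_order_spec : Claim_equal_utils_sort_folders_by_desired_order := by
  intro ds fs _
  unfold Spec_utils_sort_folders_by_desired_order
  rw [portA_eq_canon, portB_eq_canon]
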